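-- pv_equiv track=rewrite | github.com/tensorflow/tensorflow | third_party/mlir/utils/spirv/gen_spirv_dialect.py | uniquify_enum_cases
-- ===== SOURCE A (Python) =====
-- import itertools
--
-- def uniquify_enum_cases(lst):
--   """Prunes duplicate enum cases from the list.
--
--   Arguments:
--    - lst: List whose elements are to be uniqued. Assumes each element is a
--      (symbol, value) pair and elements already sorted according to value.
--
--   Returns:
--    - A list with all duplicates removed. The elements are sorted according to
--      value and, for each value, uniqued according to symbol.
--      original list,
--   """
--   cases = lst
--   uniqued_cases = []
--
--   # First sort according to the value
--   cases.sort(key=lambda x: x[1])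
--
--   # Then group them according to the value
--   for _, groups in itertools.groupby(cases, key=lambda x: x[1]):
--     # For each value, sort according to the enumerant symbol.
--     sorted_group = sorted(groups, key=lambda x: x[0])
--     # Keep the "smallest" case, which is typically the symbol without extension
--     # suffix. But we have special cases that we want to fix.
--     case = sorted_group[0]
--     if case[0] == 'HlslSemanticGOOGLE':
--       case = sorted_group[1]
--     uniqued_cases.append(case)
--
--   return uniqued_cases
-- ===== SOURCE B (Python) =====
-- def uniquify_enum_cases(lst):
--   """Single streaming pass: sort by value in place (same mutation as the
--   original), then walk the list once keeping, for the current value run, the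
--   smallest and second-smallest symbol; emit one case per run.  Where the
--   original raises IndexError (a lone 'HlslSemanticGOOGLE' case), this returns
--   that case itself."""
--   lst.sort(key=lambda x: x[1])
--   out = []
--   cur_val = None
--   best = None
--   second = None
--   for pair in lst:
--     if best is not None and pair[1] == cur_val:
--       if pair[0] < best[0]:
--         best, second = pair, best
--       elif second is None or pair[0] < second[0]:
--         second = pair
--     else:
--       if best is not None:
--         out.append(second if best[0] == 'HlslSemanticGOOGLE' and second is not None else best)
--       cur_val = pair[1]
--       best, second = pair, None
--   if best is not None:
--     out.append(second if best[0] == 'HlslSemanticGOOGLE' and second is not None else best)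
--   return out
-- ===== Notes on version B (the rewrite author's own statement) =====
-- stated objective: alternative
-- what changed: Replaces itertools.groupby plus a full sort of every value-group by a single streaming pass over the value-sorted list that keeps only the run's two lexicographically smallest symbols.
import Mathlib
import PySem

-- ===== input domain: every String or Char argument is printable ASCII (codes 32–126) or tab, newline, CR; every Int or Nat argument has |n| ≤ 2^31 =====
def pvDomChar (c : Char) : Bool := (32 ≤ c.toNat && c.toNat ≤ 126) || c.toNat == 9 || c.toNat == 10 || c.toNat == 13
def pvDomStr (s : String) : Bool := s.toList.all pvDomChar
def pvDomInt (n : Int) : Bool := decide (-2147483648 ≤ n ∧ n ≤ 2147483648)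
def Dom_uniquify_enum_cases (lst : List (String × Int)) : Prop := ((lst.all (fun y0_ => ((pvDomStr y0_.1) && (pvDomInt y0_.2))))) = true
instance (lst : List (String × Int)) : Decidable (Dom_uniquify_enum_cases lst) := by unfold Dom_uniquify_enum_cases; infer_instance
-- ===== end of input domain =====

-- B replaces groupby + a sort of every group by ONE streaming pass that keeps the run's two
-- smallest symbols (objective: alternative).  Both Pythons sort the argument in place by value;
-- the equivalence proved here is about the RETURN value.

-- ===== PORT A =====
-- itertools.groupby(cases, key=value): the maximal runs of value-equal neighbours, in order
def pvRuns : List (String × Int) → List (List (String × Int))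
  | [] => []
  | x :: xs =>
      (x :: xs.takeWhile fun y => y.2 == x.2) :: pvRuns (xs.dropWhile fun y => y.2 == x.2)
  termination_by l => l.length
  decreasing_by simpa using Nat.lt_succ_of_le (List.length_dropWhile_le _ _)

-- loop body: case = sorted_group[0]; the HlslSemanticGOOGLE fix reads sorted_group[1]
-- (pyGet? none = Python's IndexError; those inputs are excluded by Pre_, the .getD value is never claimed)
def pvCaseOf (g : List (String × Int)) : String × Int :=
  let sorted_group := PySem.List.sorted g (fun x => x.1) false
  let case0 := sorted_group.headD ("", 0)   -- groupby groups are nonempty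
  if case0.1 = "HlslSemanticGOOGLE" then (PySem.List.pyGet? sorted_group 1).getD case0 else case0

def uniquify_enum_cases (lst : List (String × Int)) : List (String × Int) :=
  let cases := PySem.List.sorted lst (fun x => x.2) false
  (pvRuns cases).map pvCaseOf

-- ===== PORT B =====
def pvEmit (best : String × Int) (second : Option (String × Int)) : String × Int :=
  match second with
  | some s => if best.1 = "HlslSemanticGOOGLE" then s else best
  | none => best

-- loop body of Source B: state (out, cur_val, best, second)
def pvStep (st : List (String × Int) × Option Int × Option (String × Int) × Option (String × Int))
    (p : String × Int) :
    List (String × Int) × Option Int × Option (String × Int) × Option (String × Int) :=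
  match st with
  | (out, curVal, some b, second) =>
      if some p.2 = curVal then
        if p.1 < b.1 then (out, curVal, some p, some b)
        else
          match second with
          | none => (out, curVal, some b, some p)
          | some s => if p.1 < s.1 then (out, curVal, some b, some p) else (out, curVal, some b, some s)
      else (out ++ [pvEmit b second], some p.2, some p, none)
  | (out, _, none, _) => (out, some p.2, some p, none)

-- the trailing 'if best is not None: out.append(...)'
def pvFinish (st : List (String × Int) × Option Int × Option (String × Int) × Option (String × Int)) :
    List (String × Int) :=
  match st with
  | (out, _, some b, second) => out ++ [pvEmit b second]
  | (out, _, none, _) => out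

def uniquify_enum_cases_alt (lst : List (String × Int)) : List (String × Int) :=
  let cases := PySem.List.sorted lst (fun x => x.2) false
  pvFinish (cases.foldl pvStep ([], none, none, none))

-- ===== PRECONDITION & SPEC =====
-- Pre_ excludes exactly the inputs on which Python A raises IndexError: a pair whose symbol is
-- 'HlslSemanticGOOGLE' and whose value occurs exactly once in the list (its group is a singleton,
-- so sorted_group[1] does not exist).
def Pre_uniquify_enum_cases (lst : List (String × Int)) : Prop :=
  ∀ p ∈ lst, p.1 = "HlslSemanticGOOGLE" → lst.countP (fun q => q.2 == p.2) ≠ 1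
instance (lst : List (String × Int)) : Decidable (Pre_uniquify_enum_cases lst) := by
  unfold Pre_uniquify_enum_cases; infer_instance

def pvWitness_uniquify_enum_cases : (List (String × Int)) :=
  [("VersionKHR", 1), ("Version", 1), ("Alone", 7)]

def Spec_uniquify_enum_cases (lst : List (String × Int)) (out : List (String × Int)) : Prop :=
  out = uniquify_enum_cases_alt lst
instance (lst : List (String × Int)) (out : List (String × Int)) : Decidable (Spec_uniquify_enum_cases lst out) := by
  unfold Spec_uniquify_enum_cases; infer_instance

-- ===== CLAIM (what is proved, stated in full; the proofs are below) =====
def Claim_equal_uniquify_enum_cases : Prop :=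
  ∀ (lst : List (String × Int)), Dom_uniquify_enum_cases lst → Pre_uniquify_enum_cases lst →
    Spec_uniquify_enum_cases lst (uniquify_enum_cases lst)

-- ===== LEMMAS AND PROOFS =====

-- the insertion step of PySem's stable sort with key = the symbol
def pvIns (x : String × Int) (acc : List (String × Int)) : List (String × Int) :=
  PySem.List.insertBy (fun a b => decide (a.1 < b.1)) x acc

lemma pvIns_ne_nil (x : String × Int) (acc : List (String × Int)) : pvIns x acc ≠ [] := by
  cases acc with
  | nil => simp [pvIns, PySem.List.insertBy]
  | cons a t =>
      by_cases h : x.1 < a.1 <;> simp [pvIns, PySem.List.insertBy, h]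

lemma pvRuns_nil : pvRuns [] = [] := by rw [pvRuns.eq_def]

-- B's selection state is exactly the first two cells of the stable insertion sort of the run
lemma sel_loop (t : List (String × Int)) : ∀ (v : Int) (out acc : List (String × Int)),
    acc ≠ [] → (∀ y ∈ t, y.2 = v) →
    t.foldl pvStep (out, some v, acc.head?, acc[1]?) =
      (out, some v, (t.foldl (fun ac x => pvIns x ac) acc).head?,
        (t.foldl (fun ac x => pvIns x ac) acc)[1]?) := by
  induction t with
  | nil => intro v out acc _ _; rfl
  | cons p t ih =>
      intro v out acc hne hv
      obtain ⟨a, rest, rfl⟩ : ∃ a rest, acc = a :: rest := by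
        cases acc with | nil => exact absurd rfl hne | cons a r => exact ⟨a, r, rfl⟩
      have hp : p.2 = v := hv p (by simp)
      have hstep : pvStep (out, some v, (a :: rest).head?, (a :: rest)[1]?) p =
          (out, some v, (pvIns p (a :: rest)).head?, (pvIns p (a :: rest))[1]?) := by
        cases rest with
        | nil =>
            by_cases h : p.1 < a.1 <;>
              simp [pvStep, pvIns, PySem.List.insertBy, hp, h]
        | cons s r =>
            by_cases h : p.1 < a.1
            · simp [pvStep, pvIns, PySem.List.insertBy, hp, h]
            · by_cases h2 : p.1 < s.1 <;>
                simp [pvStep, pvIns, PySem.List.insertBy, hp, h, h2]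
      rw [List.foldl_cons, hstep, List.foldl_cons,
        ih v out (pvIns p (a :: rest)) (pvIns_ne_nil _ _) (fun y hy => hv y (by simp [hy]))]

-- the fold of pvIns over a run, seeded with its first element, IS sorted(run, key=symbol)
lemma insfold_eq_sorted (x : String × Int) (t : List (String × Int)) :
    t.foldl (fun ac y => pvIns y ac) [x] = PySem.List.sorted (x :: t) (fun y => y.1) false := by
  rw [PySem.List.sorted_eq_foldl_insertBy]
  simp [pvIns, PySem.List.insertBy]

-- what B emits for a run equals A's per-group case
lemma emit_eq_caseOf (g : List (String × Int)) (b : String × Int) (tl : List (String × Int))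
    (h : PySem.List.sorted g (fun y => y.1) false = b :: tl) :
    pvEmit b tl.head? = pvCaseOf g := by
  unfold pvCaseOf
  rw [h]
  cases tl with
  | nil => simp [pvEmit, PySem.List.pyGet?, PySem.List.pyIdx?]
  | cons s r =>
      by_cases hb : b.1 = "HlslSemanticGOOGLE" <;>
        simp [pvEmit, hb, PySem.List.pyGet?, PySem.List.pyIdx?]

-- main loop invariant: from the start of a run (first element x consumed) the stream pass
-- produces exactly A's per-run cases, run by run
lemma run_loop : ∀ (n : Nat) (L : List (String × Int)), L.length ≤ n →
    ∀ (out : List (String × Int)) (x : String × Int),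
    pvFinish (L.foldl pvStep (out, some x.2, some x, none)) =
      out ++ (pvRuns (x :: L)).map pvCaseOf := by
  intro n
  induction n with
  | zero =>
      intro L hL out x
      have : L = [] := List.length_eq_zero_iff.mp (Nat.le_zero.mp hL)
      subst this
      have hs := insfold_eq_sorted x []
      simp only [List.foldl_nil] at hs
      have hx : pvRuns [x] = [[x]] := by rw [pvRuns]; simp [pvRuns_nil]
      rw [hx]
      simpa [pvFinish] using emit_eq_caseOf [x] x [] hs.symm
  | succ n ih =>
      intro L hL out x
      set t := L.takeWhile (fun y => y.2 == x.2) with ht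
      set rest := L.dropWhile (fun y => y.2 == x.2) with hrest
      have hsplit : L = t ++ rest := (List.takeWhile_append_dropWhile).symm
      have hvt : ∀ y ∈ t, y.2 = x.2 := by
        intro y hy
        have := List.mem_takeWhile_imp hy
        simpa using this
      have hrunx : pvRuns (x :: L) = (x :: t) :: pvRuns rest := by
        rw [pvRuns]
      have h0 : ([x] : List (String × Int)).head? = some x := rfl
      have h1 : ([x] : List (String × Int))[1]? = none := rfl
      have hsel := sel_loop t x.2 out [x] (by simp) hvt
      rw [h0, h1] at hsel
      obtain ⟨b, tl, hsorted⟩ : ∃ b tl,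
          PySem.List.sorted (x :: t) (fun y => y.1) false = b :: tl := by
        rcases hcase : PySem.List.sorted (x :: t) (fun y => y.1) false with _ | ⟨b, tl⟩
        · exact absurd ((PySem.List.sorted_eq_nil_iff _ _ _).mp hcase) (by simp)
        · exact ⟨b, tl, rfl⟩
      have hF : t.foldl (fun ac y => pvIns y ac) [x] = b :: tl := by
        rw [insfold_eq_sorted, hsorted]
      have hemit : pvEmit b tl.head? = pvCaseOf (x :: t) := emit_eq_caseOf _ _ _ hsorted
      have hfold : L.foldl pvStep (out, some x.2, some x, none) =
          (t ++ rest).foldl pvStep (out, some x.2, some x, none) := by rw [← hsplit]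
      rw [hfold, List.foldl_append, hsel, hF, hrunx]
      cases hrc : rest with
      | nil =>
          simp only [List.foldl_nil]
          simp [pvFinish, pvRuns_nil, ← List.head?_eq_getElem?, hemit]
      | cons y r' =>
          have hy2 : ¬ (y.2 == x.2) = true := by
            have : (fun y => y.2 == x.2) y = false := by
              have := List.head?_dropWhile_not (p := fun y => y.2 == x.2) (l := L)
              rw [← hrest, hrc] at this
              simpa using this
            simpa using this
          have hyne : ¬ (some y.2 = some x.2) := by
            intro hc; apply hy2; simp at hc; simp [hc]
          have hstep : pvStep (out, some x.2, (b :: tl).head?, (b :: tl)[1]?) y =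
              (out ++ [pvEmit b tl.head?], some y.2, some y, none) := by
            simp [pvStep, hyne, ← List.head?_eq_getElem?]
          have hr'len : r'.length ≤ n := by
            have : L.length = t.length + (y :: r').length := by
              rw [hsplit, hrc]; simp
            simp only [List.length_cons] at this
            omega
          rw [List.foldl_cons, hstep, ih r' hr'len (out ++ [pvEmit b tl.head?]) y]
          rw [hemit]
          simp

-- ===== VERDICT (by name: the statement is the Claim_ definition above) =====
theorem uniquify_enum_cases_spec : Claim_equal_uniquify_enum_cases := by
  intro lst _ _
  unfold Spec_uniquify_enum_cases
  change (pvRuns (PySem.List.sorted lst (fun x => x.2) false)).map pvCaseOf =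
      pvFinish ((PySem.List.sorted lst (fun x => x.2) false).foldl pvStep ([], none, none, none))
  cases hs : PySem.List.sorted lst (fun x => x.2) false with
  | nil => simp [pvRuns_nil, pvFinish]
  | cons x L =>
      have hstep : pvStep ([], none, none, none) x = ([], some x.2, some x, none) := rfl
      rw [List.foldl_cons, hstep, run_loop L.length L le_rfl [] x]
      simp
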